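-- pv_equiv track=rewrite | github.com/epolyach/Dynamic_GraphTransformer_RL | benchmark_exact_cpu.py | format_route_for_matlab
-- ===== SOURCE A (Python) =====
-- def format_route_for_matlab(vehicle_routes, solver_name=""):
--     """Format vehicle routes for MATLAB log with depot nodes included.
--
--     For heuristic solver, routes don't include depot nodes, so we add them.
--     For other solvers, routes already include depot nodes.
--     """
--     if not vehicle_routes:
--         return []
--
--     # Check if this is from the heuristic solver
--     is_heuristic = 'heuristic' in solver_name.lower()
--
--     # Flatten multiple vehicle routes into a single route
--     merged_route = []
--
--     for i, route in enumerate(vehicle_routes):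
--         if not route:
--             continue
--
--         if is_heuristic:
--             # Heuristic solver: routes don't have depot nodes
--             if i == 0 or not merged_route:
--                 merged_route.append(0)
--             merged_route.extend(route)
--             merged_route.append(0)
--         else:
--             # Other solvers: routes already have depot nodes
--             if i == 0:
--                 merged_route.extend(route)
--             else:
--                 # Skip leading depot for subsequent routes
--                 start_idx = 1 if route and route[0] == 0 else 0
--                 merged_route.extend(route[start_idx:])
--
--     # Clean up duplicate consecutive depot nodes
--     if merged_route:
--         cleaned = [merged_route[0]]
--         for j in range(1, len(merged_route)):
--             if not (merged_route[j] == 0 and merged_route[j-1] == 0):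
--                 cleaned.append(merged_route[j])
--         merged_route = cleaned
--
--     # Ensure it starts and ends with depot
--     if merged_route and merged_route[0] != 0:
--         merged_route = [0] + merged_route
--     if merged_route and merged_route[-1] != 0:
--         merged_route = merged_route + [0]
--
--     return merged_route
-- ===== SOURCE B (Python) =====
-- def format_route_for_matlab(vehicle_routes, solver_name=""):
--     """Single streaming pass: emit values, skipping a depot zero that
--     immediately follows another depot zero, then fix the endpoints."""
--     if not vehicle_routes:
--         return []
--     is_heuristic = 'heuristic' in solver_name.lower()
--     out = []
--
--     def emit(v):
--         if v != 0 or not out or out[-1] != 0: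
--             out.append(v)
--
--     for i, route in enumerate(vehicle_routes):
--         if not route:
--             continue
--         if is_heuristic:
--             if not out:
--                 emit(0)
--             for v in route:
--                 emit(v)
--             emit(0)
--         else:
--             vals = route[1:] if i > 0 and route[0] == 0 else route
--             for v in vals:
--                 emit(v)
--     if out and out[0] != 0:
--         out.insert(0, 0)
--     if out and out[-1] != 0:
--         out.append(0)
--     return out
-- ===== Notes on version B (the rewrite author's own statement) =====
-- stated objective: simpler
-- what changed: B merges, strips and deduplicates consecutive depot zeros in one streaming pass with an emit step that looks at the last emitted value, instead of A's build-merged-list-then-separate-index-based-cleanup pass.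
import Mathlib
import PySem

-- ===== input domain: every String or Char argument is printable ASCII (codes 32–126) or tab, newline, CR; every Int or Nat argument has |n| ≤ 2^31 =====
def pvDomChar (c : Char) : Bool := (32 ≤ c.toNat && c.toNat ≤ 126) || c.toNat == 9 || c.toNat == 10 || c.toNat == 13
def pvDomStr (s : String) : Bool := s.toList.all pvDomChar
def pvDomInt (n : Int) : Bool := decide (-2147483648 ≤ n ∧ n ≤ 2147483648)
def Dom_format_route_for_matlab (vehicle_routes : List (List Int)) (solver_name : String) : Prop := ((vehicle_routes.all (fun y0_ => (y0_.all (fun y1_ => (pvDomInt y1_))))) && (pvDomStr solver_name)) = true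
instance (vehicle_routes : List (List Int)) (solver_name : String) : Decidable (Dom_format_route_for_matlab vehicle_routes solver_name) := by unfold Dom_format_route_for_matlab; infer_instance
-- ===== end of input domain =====

-- B merges routes and collapses consecutive depot zeros in one streaming pass instead of A's
-- merge-then-separate-cleanup (objective: simpler; same asymptotic cost).

-- ===== PORT A =====
-- A's merge step, run over enumerate(vehicle_routes)
def pvStepA (heur : Bool) (acc : List Int) (p : Int × List Int) : List Int :=
  if p.2 = [] then acc
  else if heur then
    (if p.1 = 0 ∨ acc = [] then acc ++ [0] else acc) ++ p.2 ++ [0]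
  else if p.1 = 0 then acc ++ p.2
  else
    -- start_idx = 1 if route and route[0] == 0 else 0; route[start_idx:]
    acc ++ PySem.List.slice p.2 (some (if p.2 ≠ [] ∧ p.2.headD 0 = 0 then 1 else 0)) none

-- A's separate cleanup pass: for j in range(1, len(m)): keep m[j] unless m[j] == 0 == m[j-1]
def pvCleanA (m : List Int) : List Int :=
  if m ≠ [] then
    (PySem.List.pyRange 1 (m.length : Int) 1).foldl
      (fun cleaned j =>
        if ¬(PySem.List.pyGetD m j 0 = 0 ∧ PySem.List.pyGetD m (j-1) 0 = 0)
        then cleaned ++ [PySem.List.pyGetD m j 0] else cleaned)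
      [PySem.List.pyGetD m 0 0]
  else m

def format_route_for_matlab (vehicle_routes : List (List Int)) (solver_name : String) : List Int :=
  if vehicle_routes = [] then []
  else
    let is_heuristic := PySem.Str.isIn "heuristic" (PySem.Str.lower solver_name)
    let merged := (PySem.List.enumerate vehicle_routes 0).foldl (pvStepA is_heuristic) []
    let merged2 := pvCleanA merged
    let merged3 := if merged2 ≠ [] ∧ merged2.headD 0 ≠ 0 then 0 :: merged2 else merged2
    if merged3 ≠ [] ∧ merged3.getLastD 0 ≠ 0 then merged3 ++ [0] else merged3

-- ===== PORT B =====
-- B's streaming emit: append v unless it is a depot zero right after a depot zero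
def pvEmit (out : List Int) (v : Int) : List Int :=
  if v ≠ 0 ∨ out = [] ∨ out.getLastD 0 ≠ 0 then out ++ [v] else out

def pvStepB (heur : Bool) (out : List Int) (p : Int × List Int) : List Int :=
  if p.2 = [] then out
  else if heur then
    pvEmit (p.2.foldl pvEmit (if out = [] then pvEmit out 0 else out)) 0
  else
    (if p.1 > 0 ∧ p.2.headD 0 = 0 then PySem.List.slice p.2 (some 1) none else p.2).foldl pvEmit out

def format_route_for_matlab_alt (vehicle_routes : List (List Int)) (solver_name : String) : List Int :=
  if vehicle_routes = [] then []
  else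
    let is_heuristic := PySem.Str.isIn "heuristic" (PySem.Str.lower solver_name)
    let out := (PySem.List.enumerate vehicle_routes 0).foldl (pvStepB is_heuristic) []
    let out2 := if out ≠ [] ∧ out.headD 0 ≠ 0 then 0 :: out else out
    if out2 ≠ [] ∧ out2.getLastD 0 ≠ 0 then out2 ++ [0] else out2

-- ===== PRECONDITION & SPEC =====
def Spec_format_route_for_matlab (vehicle_routes : List (List Int)) (solver_name : String) (out : List Int) : Prop := out = format_route_for_matlab_alt vehicle_routes solver_name
instance (vehicle_routes : List (List Int)) (solver_name : String) (out : List Int) : Decidable (Spec_format_route_for_matlab vehicle_routes solver_name out) := by unfold Spec_format_route_for_matlab; infer_instance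

-- ===== CLAIM (what is proved, stated in full; the proofs are below) =====
def Claim_equal_format_route_for_matlab : Prop := ∀ (vehicle_routes : List (List Int)) (solver_name : String), Dom_format_route_for_matlab vehicle_routes solver_name → Spec_format_route_for_matlab vehicle_routes solver_name (format_route_for_matlab vehicle_routes solver_name)

-- ===== LEMMAS AND PROOFS =====

-- a non-empty emit accumulator stays non-empty
theorem pvEmit_foldl_ne_nil (l : List Int) (c : List Int) (hc : c ≠ []) :
    l.foldl pvEmit c ≠ [] := by
  induction l generalizing c with
  | nil => exact hc
  | cons v t ih =>
      simp only [List.foldl_cons]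
      apply ih
      unfold pvEmit
      split
      · simp
      · exact hc

theorem foldl_pvEmit_nil_eq_nil_iff (acc : List Int) :
    acc.foldl pvEmit [] = [] ↔ acc = [] := by
  cases acc with
  | nil => simp
  | cons x t =>
      simp only [List.foldl_cons]
      have h1 : pvEmit [] x = [x] := by unfold pvEmit; rw [if_pos (Or.inr (Or.inl rfl))]; rfl
      rw [h1]
      constructor
      · intro h; exact absurd h (pvEmit_foldl_ne_nil t [x] (by simp))
      · intro h; cases h

-- structural form of A's cleanup loop, carrying the previous element
def pvGoA (prev : Int) (rest : List Int) (c : List Int) : List Int :=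
  match rest with
  | [] => c
  | v :: t => pvGoA v t (if ¬(v = 0 ∧ prev = 0) then c ++ [v] else c)

theorem pvGoA_eq_foldl_pvEmit (rest : List Int) : ∀ (prev : Int) (c : List Int),
    c ≠ [] → c.getLastD 0 = prev → pvGoA prev rest c = rest.foldl pvEmit c := by
  induction rest with
  | nil => intro prev c _ _; rfl
  | cons v t ih =>
      intro prev c hc hlast
      simp only [pvGoA, List.foldl_cons]
      have hemit : pvEmit c v = if ¬(v = 0 ∧ prev = 0) then c ++ [v] else c := by
        unfold pvEmit
        by_cases h : v = 0 ∧ prev = 0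
        · have hcnd : ¬(v ≠ 0 ∨ c = [] ∨ c.getLastD 0 ≠ 0) := by
            rintro (hv | hcc | hl)
            · exact hv h.1
            · exact hc hcc
            · exact hl (by rw [hlast, h.2])
          rw [if_neg hcnd, if_neg (not_not_intro h)]
        · have hcnd : v ≠ 0 ∨ c = [] ∨ c.getLastD 0 ≠ 0 := by
            rcases Decidable.em (v = 0) with hv | hv
            · right; right; rw [hlast]; intro hp; exact h ⟨hv, hp⟩
            · left; exact hv
          rw [if_pos hcnd, if_pos h]
      rw [hemit]
      by_cases h : v = 0 ∧ prev = 0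
      · rw [if_neg (not_not_intro h)]
        refine ih v c hc ?_
        rw [hlast, h.2]; exact h.1.symm
      · rw [if_pos h]
        exact ih v (c ++ [v]) (by simp) (List.getLastD_concat ..)

-- A's index loop over range(1, len m) is pvGoA over the suffix
theorem pvCleanA_loop (n : Nat) : ∀ (m : List Int) (k : Nat) (acc : List Int),
    1 ≤ k → k ≤ m.length → n = m.length - k →
    (PySem.List.pyRange (k : Int) (m.length : Int) 1).foldl
      (fun cleaned j =>
        if ¬(PySem.List.pyGetD m j 0 = 0 ∧ PySem.List.pyGetD m (j-1) 0 = 0)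
        then cleaned ++ [PySem.List.pyGetD m j 0] else cleaned) acc
    = pvGoA (m.getD (k-1) 0) (m.drop k) acc := by
  induction n with
  | zero =>
      intro m k acc hk1 hk2 hn
      have hk : k = m.length := by omega
      rw [PySem.List.pyRange_one_eq_nil (by exact_mod_cast le_of_eq hk.symm)]
      simp [hk, pvGoA]
  | succ n ih =>
      intro m k acc hk1 hk2 hn
      have hklt : k < m.length := by omega
      rw [PySem.List.pyRange_one_cons (by exact_mod_cast hklt)]
      simp only [List.foldl_cons]
      have hget : PySem.List.pyGetD m (k : Int) 0 = m[k] := by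
        rw [PySem.List.pyGetD_natCast]; exact List.getD_eq_getElem m 0 hklt
      have hget' : PySem.List.pyGetD m ((k : Int) - 1) 0 = m.getD (k-1) 0 := by
        have h : (k : Int) - 1 = ((k - 1 : Nat) : Int) := by omega
        rw [h, PySem.List.pyGetD_natCast]
      have hcast : (k : Int) + 1 = ((k + 1 : Nat) : Int) := by push_cast; ring
      rw [hcast, ih m (k+1) _ (by omega) (by omega) (by omega)]
      rw [List.drop_eq_getElem_cons hklt]
      simp only [pvGoA, hget, hget', Nat.add_sub_cancel]
      rw [List.getD_eq_getElem m 0 hklt]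

theorem pvCleanA_eq (m : List Int) : pvCleanA m = m.foldl pvEmit [] := by
  cases m with
  | nil => rfl
  | cons x t =>
      unfold pvCleanA
      rw [if_pos (by simp)]
      have hl := pvCleanA_loop ((x :: t).length - 1) (x :: t) 1
        [PySem.List.pyGetD (x :: t) 0 0] (by omega) (by simp) rfl
      simp only [Nat.cast_one] at hl
      rw [hl]
      have h0 : PySem.List.pyGetD (x :: t) (0 : Int) 0 = x := PySem.List.pyGetD_zero_cons ..
      rw [h0]
      have hgoal : pvGoA ((x :: t).getD 0 0) ((x :: t).drop 1) [x] = t.foldl pvEmit [x] := by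
        simpa using pvGoA_eq_foldl_pvEmit t x [x] (by simp) (by simp)
      rw [hgoal]
      have h1 : pvEmit [] x = [x] := by unfold pvEmit; rw [if_pos (Or.inr (Or.inl rfl))]; rfl
      simp only [List.foldl_cons, h1]

-- step agreement away from index 0, under the invariant out = foldl pvEmit [] acc
theorem pvStep_agree (heur : Bool) (p : Int × List Int) (acc : List Int) (hp : 0 < p.1) :
    pvStepB heur (acc.foldl pvEmit []) p = (pvStepA heur acc p).foldl pvEmit [] := by
  have hp0 : ¬ p.1 = 0 := by omega
  unfold pvStepA pvStepB
  by_cases hr : p.2 = []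
  · simp [hr]
  · rw [if_neg hr]
    by_cases hh : heur = true
    · rw [if_pos hh]
      by_cases ha : acc = []
      · subst ha
        simp [hr, hh, List.foldl_append]
      · rw [if_neg (show ¬ List.foldl pvEmit [] acc = [] from
              fun h0 => ha ((foldl_pvEmit_nil_eq_nil_iff acc).mp h0)),
            if_neg (not_or.mpr ⟨hp0, ha⟩)]
        simp [hr, hh, List.foldl_append]
    · rw [if_neg hh, if_neg hp0]
      by_cases hz : p.2.headD 0 = 0
      · rw [if_pos (show p.1 > 0 ∧ p.2.headD 0 = 0 from ⟨hp, hz⟩),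
            if_pos (show p.2 ≠ [] ∧ p.2.headD 0 = 0 from ⟨hr, hz⟩)]
        simp [hr, hh, List.foldl_append]
      · rw [if_neg (show ¬(p.1 > 0 ∧ p.2.headD 0 = 0) from fun h => hz h.2),
            if_neg (show ¬(p.2 ≠ [] ∧ p.2.headD 0 = 0) from fun h => hz h.2)]
        have hs : PySem.List.slice p.2 (some 0) none = p.2 := by
          rw [PySem.List.slice_zero_start, PySem.List.slice_none_none]
        rw [hs]
        simp [hr, hh, List.foldl_append]

-- the whole merge loop from index 1 on
theorem pvLoop_agree (heur : Bool) (routes : List (List Int)) : ∀ (s : Int) (acc : List Int), 1 ≤ s →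
    (PySem.List.enumerate routes s).foldl (pvStepB heur) (acc.foldl pvEmit []) =
    ((PySem.List.enumerate routes s).foldl (pvStepA heur) acc).foldl pvEmit [] := by
  induction routes with
  | nil => intro s acc _; simp [PySem.List.enumerate_nil]
  | cons r rs ih =>
      intro s acc hs
      rw [PySem.List.enumerate_cons]
      simp only [List.foldl_cons]
      rw [pvStep_agree heur (s, r) acc (by simpa using hs)]
      exact ih (s + 1) (pvStepA heur acc (s, r)) (by omega)

-- the first route (index 0) starts from the empty accumulator in both programs
theorem pvFirst_agree (heur : Bool) (r : List Int) :
    pvStepB heur [] ((0 : Int), r) = (pvStepA heur [] ((0 : Int), r)).foldl pvEmit [] := by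
  unfold pvStepA pvStepB
  by_cases hr : r = []
  · simp [hr]
  · by_cases hh : heur = true
    · simp [hr, hh, List.foldl_append]
    · simp only [Bool.not_eq_true] at hh
      simp [hr, hh]

-- the two merge results relate by the streaming cleanup
theorem pvMerge_agree (heur : Bool) (vr : List (List Int)) :
    (PySem.List.enumerate vr 0).foldl (pvStepB heur) [] =
    pvCleanA ((PySem.List.enumerate vr 0).foldl (pvStepA heur) []) := by
  rw [pvCleanA_eq]
  cases vr with
  | nil => simp [PySem.List.enumerate_nil]
  | cons r rs =>
      rw [PySem.List.enumerate_cons]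
      simp only [List.foldl_cons]
      rw [pvFirst_agree heur r]
      exact pvLoop_agree heur rs 1 (pvStepA heur [] (0, r)) (by norm_num)

-- ===== VERDICT (by name: the statement is the Claim_ definition above) =====
theorem format_route_for_matlab_spec : Claim_equal_format_route_for_matlab := by
  intro vr s _
  unfold Spec_format_route_for_matlab format_route_for_matlab format_route_for_matlab_alt
  by_cases hvr : vr = []
  · simp [hvr]
  · simp only [if_neg hvr]
    rw [pvMerge_agree]
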